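-- pv_equiv track=rewrite | github.com/josiahnross/TLiDB | dataset_preprocessing/friends/utils.py | remove_notes_from_utt
-- ===== SOURCE A (Python) =====
-- OPENERS = ["(","[","{","<"]
--
-- CLOSERS = [")","]","}",">"]
--
-- def remove_notes_from_utt(utterance):
--     new_utt = []
--     note_starts = [i for i, x in enumerate(utterance) if any(opener in x for opener in OPENERS)]
--     note_ends = [i for i, x in enumerate(utterance) if any(closer in x for closer in CLOSERS)]
--     if note_starts:
--         assert(len(note_starts) == len(note_ends))
--         assert(all([note_starts[i] <= note_ends[i] for i in range(len(note_starts))]))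
--         excluded_indices = []
--         for s,e in zip(note_starts, note_ends):
--             excluded_indices.extend(range(s,e+1))
--         for i,x in enumerate(utterance):
--             if i not in excluded_indices:
--                 new_utt.append(x)
--     else:
--         new_utt = utterance
--     return new_utt
-- ===== SOURCE B (Python) =====
-- OPENERS = ["(","[","{","<"]
--
-- CLOSERS = [")","]","}",">"]
--
-- def remove_notes_from_utt(utterance):
--     note_starts = [i for i, x in enumerate(utterance) if any(opener in x for opener in OPENERS)]
--     note_ends = [i for i, x in enumerate(utterance) if any(closer in x for closer in CLOSERS)]
--     if not note_starts:
--         return utterance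
--     assert(len(note_starts) == len(note_ends))
--     assert(all([note_starts[i] <= note_ends[i] for i in range(len(note_starts))]))
--     out = []
--     prev = 0
--     for s, e in zip(note_starts, note_ends):
--         out.extend(utterance[prev:s])
--         prev = e + 1
--     out.extend(utterance[prev:])
--     return out
-- ===== Notes on version B (the rewrite author's own statement) =====
-- stated objective: alternative
-- what changed: Instead of materialising every excluded index with range-expansion and then filtering each token through a list-membership test, B walks the (start,end) note spans once with a prev pointer and concatenates the complementary kept slices.
import Mathlib
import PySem

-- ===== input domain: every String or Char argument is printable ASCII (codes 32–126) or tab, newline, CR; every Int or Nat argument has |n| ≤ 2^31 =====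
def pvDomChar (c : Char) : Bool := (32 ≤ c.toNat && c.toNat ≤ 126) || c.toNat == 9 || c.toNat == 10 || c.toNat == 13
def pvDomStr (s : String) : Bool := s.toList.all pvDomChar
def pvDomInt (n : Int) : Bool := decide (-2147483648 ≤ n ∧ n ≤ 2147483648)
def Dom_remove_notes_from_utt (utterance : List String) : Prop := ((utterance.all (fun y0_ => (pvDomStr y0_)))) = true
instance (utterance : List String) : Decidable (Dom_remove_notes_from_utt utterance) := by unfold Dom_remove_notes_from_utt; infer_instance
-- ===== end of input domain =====

-- B replaces A's excluded-index list + per-token membership filter by one pass over the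
-- note spans that concatenates the complementary kept slices (alternative decomposition;
-- return-value equivalence: when there are no notes both Pythons return the argument list
-- itself, and neither mutates its argument).

-- ===== PORT A =====
-- shared comprehensions (identical lines in Source A and Source B)
def pvOpeners : List String := ["(", "[", "{", "<"]
def pvClosers : List String := [")", "]", "}", ">"]
def pvNoteStarts (utterance : List String) : List Int :=
  (PySem.List.enumerate utterance).filterMap
    (fun ix => if pvOpeners.any (fun o => PySem.Str.isIn o ix.2) then some ix.1 else none)
def pvNoteEnds (utterance : List String) : List Int :=
  (PySem.List.enumerate utterance).filterMap
    (fun ix => if pvClosers.any (fun c => PySem.Str.isIn c ix.2) then some ix.1 else none)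

def remove_notes_from_utt (utterance : List String) : List String :=
  let note_starts := pvNoteStarts utterance
  let note_ends := pvNoteEnds utterance
  if note_starts ≠ [] then
    let excluded_indices : List Int :=
      (note_starts.zip note_ends).foldl (fun acc se => acc ++ PySem.List.pyRange se.1 (se.2 + 1)) []
    (PySem.List.enumerate utterance).foldl
      (fun acc ix => if excluded_indices.contains ix.1 then acc else acc ++ [ix.2]) []
  else utterance

-- ===== PORT B =====
def remove_notes_from_utt_alt (utterance : List String) : List String :=
  let note_starts := pvNoteStarts utterance
  let note_ends := pvNoteEnds utterance
  if note_starts = [] then utterance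
  else
    let st := (note_starts.zip note_ends).foldl
      (fun (st : List String × Int) se =>
        (st.1 ++ PySem.List.slice utterance (some st.2) (some se.1), se.2 + 1))
      ([], 0)
    st.1 ++ PySem.List.slice utterance (some st.2) none

-- ===== PRECONDITION & SPEC =====
-- Pre_ excludes exactly the inputs on which A's asserts fail (AssertionError): when there are
-- note starts, there must be equally many note ends and each start index ≤ its paired end index.
def Pre_remove_notes_from_utt (utterance : List String) : Prop :=
  pvNoteStarts utterance ≠ [] →
    (pvNoteStarts utterance).length = (pvNoteEnds utterance).length ∧
    ∀ p ∈ (pvNoteStarts utterance).zip (pvNoteEnds utterance), p.1 ≤ p.2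
instance (utterance : List String) : Decidable (Pre_remove_notes_from_utt utterance) := by
  unfold Pre_remove_notes_from_utt; infer_instance
def pvWitness_remove_notes_from_utt : List String := ["(a", "b)", "c"]

def Spec_remove_notes_from_utt (utterance : List String) (out : List String) : Prop := out = remove_notes_from_utt_alt utterance
instance (utterance : List String) (out : List String) : Decidable (Spec_remove_notes_from_utt utterance out) := by unfold Spec_remove_notes_from_utt; infer_instance

-- ===== CLAIM (what is proved, stated in full; the proofs are below) =====
def Claim_equal_remove_notes_from_utt : Prop := ∀ (utterance : List String), Dom_remove_notes_from_utt utterance → Pre_remove_notes_from_utt utterance → Spec_remove_notes_from_utt utterance (remove_notes_from_utt utterance)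

-- ===== LEMMAS AND PROOFS =====

theorem pvFiltInterval (u : List String) : ∀ (s0 a b : Int),
    ((PySem.List.enumerate u s0).filter (fun ix => decide (a ≤ ix.1) && decide (ix.1 < b))).map Prod.snd
    = List.take ((b - s0).toNat - (a - s0).toNat) (List.drop ((a - s0).toNat) u) := by
  induction u with
  | nil => intro s0 a b; simp [PySem.List.enumerate]
  | cons x t ih =>
    intro s0 a b
    rw [PySem.List.enumerate_cons, List.filter_cons]
    by_cases ha : a ≤ s0
    · by_cases hb : s0 < b
      · have e1 : (a - s0).toNat = 0 := by omega
        have e2 : (a - (s0+1)).toNat = 0 := by omega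
        have e3 : (b - s0).toNat = (b - (s0+1)).toNat + 1 := by omega
        simp only [ha, hb, decide_true, Bool.and_self, if_true, List.map_cons, ih (s0+1),
          e1, e2, e3, List.drop_zero, List.take_succ_cons, Nat.sub_zero]
      · have e1 : (b - s0).toNat = 0 := by omega
        have e2 : (b - (s0+1)).toNat = 0 := by omega
        simp [ha, hb, ih (s0+1), e1, e2]
    · have e1 : (a - s0).toNat = (a - (s0+1)).toNat + 1 := by omega
      have e2 : (b - s0).toNat - (a - s0).toNat = (b - (s0+1)).toNat - (a - (s0+1)).toNat := by omega
      simp only [ha, decide_false, Bool.false_and]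
      simp only [Bool.false_eq_true, if_false, ih (s0+1), e1, List.drop_succ_cons]
      congr 1
      omega

theorem pvFiltFrom (u : List String) : ∀ (s0 a : Int),
    ((PySem.List.enumerate u s0).filter (fun ix => decide (a ≤ ix.1))).map Prod.snd
    = List.drop ((a - s0).toNat) u := by
  induction u with
  | nil => intro s0 a; simp [PySem.List.enumerate]
  | cons x t ih =>
    intro s0 a
    rw [PySem.List.enumerate_cons, List.filter_cons]
    by_cases ha : a ≤ s0
    · have e1 : (a - s0).toNat = 0 := by omega
      have e2 : (a - (s0+1)).toNat = 0 := by omega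
      simp [ha, ih (s0+1), e1, e2]
    · have e1 : (a - s0).toNat = (a - (s0+1)).toNat + 1 := by omega
      simp only [ha, decide_false]
      simp only [Bool.false_eq_true, if_false, ih (s0+1), e1, List.drop_succ_cons]

theorem pvFilterOrSplit {β : Type} (c1 c2 : Int → Bool) (s : Int)
    (h1 : ∀ i, c1 i = true → i < s) (h2 : ∀ i, c2 i = true → s ≤ i) :
    ∀ (l : List (Int × β)), l.Pairwise (fun p q => p.1 < q.1) →
      l.filter (fun ix => c1 ix.1 || c2 ix.1)
      = l.filter (fun ix => c1 ix.1) ++ l.filter (fun ix => c2 ix.1) := by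
  intro l
  induction l with
  | nil => simp
  | cons p t ih =>
    intro hp
    rw [List.pairwise_cons] at hp
    obtain ⟨hlt, hpt⟩ := hp
    rw [List.filter_cons, List.filter_cons, List.filter_cons]
    cases hc1 : c1 p.1 with
    | true =>
      have hc2 : c2 p.1 = false := by
        cases h : c2 p.1 with
        | true => exact absurd (h2 _ h) (by have := h1 _ hc1; omega)
        | false => rfl
      simp [hc2, ih hpt]
    | false =>
      cases hc2 : c2 p.1 with
      | true =>
        have ht1 : t.filter (fun ix => c1 ix.1) = [] := by
          apply List.filter_eq_nil_iff.mpr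
          intro q hq
          have hq1 := hlt q hq
          have hq2 := h2 _ hc2
          cases h : c1 q.1 with
          | true => exact absurd (h1 _ h) (by omega)
          | false => simp
        simp [ih hpt, ht1]
      | false =>
        simp [ih hpt]

theorem pvCondSplit (s e prev : Int) (r : List (Int × Int)) (hse : s ≤ e) (hprev : prev ≤ e + 1)
    (hr : ∀ p ∈ r, s < p.1) (i : Int) :
    (decide (prev ≤ i) && (((s,e) :: r).all (fun p => !(decide (p.1 ≤ i) && decide (i ≤ p.2)))))
    = ((decide (prev ≤ i) && decide (i < s))
       || (decide (e+1 ≤ i) && r.all (fun p => !(decide (p.1 ≤ i) && decide (i ≤ p.2))))) := by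
  by_cases his : i < s
  · have hall : r.all (fun p => !(decide (p.1 ≤ i) && decide (i ≤ p.2))) = true := by
      apply List.all_eq_true.mpr
      intro p hp
      have := hr p hp
      simp only [Bool.not_eq_eq_eq_not, Bool.not_true, Bool.and_eq_false_iff]
      left; simp; omega
    have hie : ¬ (e + 1 ≤ i) := by omega
    rw [List.all_cons, hall, Bool.eq_iff_iff]
    simp
    omega
  · by_cases hie : e + 1 ≤ i
    · have hpe : prev ≤ i := by omega
      have h' : e < i := by omega
      have h'' : ¬ i < s := by omega
      rw [List.all_cons, Bool.eq_iff_iff]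
      simp [hpe, h', h'']
    · -- s ≤ i ≤ e : the head pair excludes i, and i < s fails
      rw [List.all_cons, Bool.eq_iff_iff]
      simp
      omega

theorem pvFoldlGap (u : List String) :
    ∀ (pairs : List (Int × Int)) (acc : List String) (prev : Int),
      0 ≤ prev →
      (∀ p ∈ pairs, 0 ≤ p.1) →
      (∀ p ∈ pairs, p.1 ≤ p.2) →
      (∀ p ∈ pairs, prev ≤ p.2 + 1) →
      List.Pairwise (fun (p q : Int × Int) => p.1 < q.1) pairs →
      List.Pairwise (fun (p q : Int × Int) => p.2 < q.2) pairs →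
      ((pairs.foldl (fun st se => (st.1 ++ PySem.List.slice u (some st.2) (some se.1), se.2 + 1)) (acc, prev)).1
        ++ PySem.List.slice u (some (pairs.foldl (fun st se => (st.1 ++ PySem.List.slice u (some st.2) (some se.1), se.2 + 1)) (acc, prev)).2) none)
      = acc ++ ((PySem.List.enumerate u).filter
          (fun ix => decide (prev ≤ ix.1) &&
            pairs.all (fun p => !(decide (p.1 ≤ ix.1) && decide (ix.1 ≤ p.2))))).map Prod.snd := by
  intro pairs
  induction pairs with
  | nil =>
    intro acc prev h0 _ _ _ _ _
    simp only [List.foldl_nil, List.all_nil, Bool.and_true]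
    rw [PySem.List.slice_from u h0]
    have := pvFiltFrom u 0 prev
    simp only [Int.sub_zero] at this
    rw [this]
  | cons se r ih =>
    intro acc prev h0 hpos hse hprev hfst hsnd
    obtain ⟨s, e⟩ := se
    rw [List.pairwise_cons] at hfst hsnd
    have hs0 : (0:Int) ≤ s := hpos (s,e) (by simp)
    have hse0 : s ≤ e := hse (s,e) (by simp)
    rw [List.foldl_cons]
    rw [ih (acc ++ PySem.List.slice u (some prev) (some s)) (e+1) (by omega)
        (fun p hp => hpos p (by simp [hp]))
        (fun p hp => hse p (by simp [hp]))
        (fun p hp => by have := hsnd.1 p hp; omega)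
        hfst.2 hsnd.2]
    rw [List.append_assoc]
    congr 1
    -- slice prev s ++ filter_{e+1,r} = filter_{prev,(s,e)::r}
    have hcs : ∀ ix ∈ PySem.List.enumerate u,
        (decide (prev ≤ ix.1) && (((s,e) :: r).all (fun p => !(decide (p.1 ≤ ix.1) && decide (ix.1 ≤ p.2)))))
        = ((decide (prev ≤ ix.1) && decide (ix.1 < s))
           || (decide (e+1 ≤ ix.1) && r.all (fun p => !(decide (p.1 ≤ ix.1) && decide (ix.1 ≤ p.2))))) := by
      intro ix _
      exact pvCondSplit s e prev r hse0 (hprev (s,e) (by simp)) (fun p hp => hfst.1 p hp) ix.1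
    rw [List.filter_congr hcs]
    rw [pvFilterOrSplit (fun i => decide (prev ≤ i) && decide (i < s))
          (fun i => decide (e+1 ≤ i) && r.all (fun p => !(decide (p.1 ≤ i) && decide (i ≤ p.2)))) s
          (by intro i h; simp at h; omega)
          (by intro i h; simp at h; omega)
          (PySem.List.enumerate u) (PySem.List.pairwise_lt_enumerate u 0)]
    rw [List.map_append]
    congr 1
    have hint := pvFiltInterval u 0 prev s
    simp only [Int.sub_zero] at hint
    have hsl : PySem.List.slice u (some prev) (some s)
        = List.take (s.toNat - prev.toNat) (List.drop prev.toNat u) := by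
      rw [show prev = ((prev.toNat : Int)) from by omega, show s = ((s.toNat : Int)) from by omega,
        PySem.List.slice_natCast]
      simp [show (max s 0) = s from by omega, show (max prev 0) = prev from by omega]
    rw [hsl, hint]

theorem pvFilterMapIf {α β : Type} (l : List α) (p : α → Bool) (f : α → β) :
    l.filterMap (fun x => if p x then some (f x) else none) = (l.filter p).map f := by
  induction l with
  | nil => rfl
  | cons x t ih =>
    rw [List.filterMap_cons, List.filter_cons]
    cases h : p x with
    | true => simp [ih]
    | false => simp [ih]

theorem pvStarts_eq (u : List String) :
    pvNoteStarts u = ((PySem.List.enumerate u).filter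
      (fun ix => pvOpeners.any (fun o => PySem.Str.isIn o ix.2))).map Prod.fst := by
  unfold pvNoteStarts
  exact pvFilterMapIf _ _ _

theorem pvEnds_eq (u : List String) :
    pvNoteEnds u = ((PySem.List.enumerate u).filter
      (fun ix => pvClosers.any (fun c => PySem.Str.isIn c ix.2))).map Prod.fst := by
  unfold pvNoteEnds
  exact pvFilterMapIf _ _ _

theorem pvEnumFstPairwise (u : List String) (p : Int × String → Bool) :
    List.Pairwise (· < ·) (((PySem.List.enumerate u).filter p).map Prod.fst) := by
  apply List.pairwise_map.mpr
  exact (PySem.List.pairwise_lt_enumerate u 0).filter p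

theorem pvEnumFstNonneg (u : List String) (p : Int × String → Bool) (i : Int)
    (hi : i ∈ ((PySem.List.enumerate u).filter p).map Prod.fst) : 0 ≤ i := by
  rw [List.mem_map] at hi
  obtain ⟨ix, hix, rfl⟩ := hi
  have := List.mem_of_mem_filter hix
  rw [PySem.List.mem_enumerate_iff] at this
  obtain ⟨k, hk, rfl⟩ := this
  simp

-- ===== VERDICT (by name: the statement is the Claim_ definition above) =====
theorem remove_notes_from_utt_spec : Claim_equal_remove_notes_from_utt := by
  intro u _ hpre
  unfold Spec_remove_notes_from_utt
  by_cases hne : pvNoteStarts u = []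
  · simp [remove_notes_from_utt, remove_notes_from_utt_alt, hne]
  · obtain ⟨hlen, hse⟩ := hpre hne
    have hposS : ∀ i ∈ pvNoteStarts u, (0:Int) ≤ i := by
      rw [pvStarts_eq]; exact pvEnumFstNonneg u _
    have hpwS : List.Pairwise (· < ·) (pvNoteStarts u) := by
      rw [pvStarts_eq]; exact pvEnumFstPairwise u _
    have hpwE : List.Pairwise (· < ·) (pvNoteEnds u) := by
      rw [pvEnds_eq]; exact pvEnumFstPairwise u _
    have hmapfst : List.map Prod.fst ((pvNoteStarts u).zip (pvNoteEnds u)) = pvNoteStarts u :=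
      List.map_fst_zip (by omega)
    have hmapsnd : List.map Prod.snd ((pvNoteStarts u).zip (pvNoteEnds u)) = pvNoteEnds u :=
      List.map_snd_zip (by omega)
    have hfst : List.Pairwise (fun (p q : Int × Int) => p.1 < q.1) ((pvNoteStarts u).zip (pvNoteEnds u)) := by
      have h := hpwS; rw [← hmapfst] at h; exact List.pairwise_map.mp h
    have hsnd : List.Pairwise (fun (p q : Int × Int) => p.2 < q.2) ((pvNoteStarts u).zip (pvNoteEnds u)) := by
      have h := hpwE; rw [← hmapsnd] at h; exact List.pairwise_map.mp h
    have hpos : ∀ p ∈ (pvNoteStarts u).zip (pvNoteEnds u), (0:Int) ≤ p.1 := by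
      intro p hp; exact hposS p.1 (List.of_mem_zip hp).1
    have hB := pvFoldlGap u ((pvNoteStarts u).zip (pvNoteEnds u)) [] 0 (le_refl 0)
      hpos hse (fun p hp => by have := hpos p hp; have := hse p hp; omega) hfst hsnd
    -- reduce both ports
    simp only [remove_notes_from_utt, remove_notes_from_utt_alt, hne, ne_eq,
      not_false_eq_true, if_true]
    rw [hB]
    -- A side
    have hfun : (fun (acc : List String) (ix : Int × String) =>
        if (((pvNoteStarts u).zip (pvNoteEnds u)).foldl
              (fun acc se => acc ++ PySem.List.pyRange se.1 (se.2 + 1)) []).contains ix.1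
        then acc else acc ++ [ix.2])
        = (fun (acc : List String) (ix : Int × String) =>
          if (!((((pvNoteStarts u).zip (pvNoteEnds u)).foldl
              (fun acc se => acc ++ PySem.List.pyRange se.1 (se.2 + 1)) []).contains ix.1)) = true
          then acc ++ [ix.2] else acc) := by
      funext acc ix
      cases h : (((pvNoteStarts u).zip (pvNoteEnds u)).foldl
          (fun acc se => acc ++ PySem.List.pyRange se.1 (se.2 + 1)) []).contains ix.1 <;> simp
    rw [hfun, PySem.List.foldl_append_if]
    congr 1
    congr 1
    apply List.filter_congr
    intro ix hix
    have h0 : 0 ≤ ix.1 := by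
      rw [PySem.List.mem_enumerate_iff] at hix
      obtain ⟨k, hk, rfl⟩ := hix
      simp
    rw [PySem.List.foldl_append_eq_flatMap, Bool.eq_iff_iff]
    simp only [List.nil_append, Bool.not_eq_eq_eq_not, Bool.not_true, Bool.and_eq_true,
      decide_eq_true_eq, List.all_eq_true, Bool.not_eq_true', Bool.and_eq_false_iff,
      decide_eq_false_iff_not, List.contains_eq_mem, List.mem_flatMap,
      PySem.List.mem_pyRange_one, not_exists, not_and, Bool.not_eq_true, decide_eq_false_iff_not]
    constructor
    · intro h
      refine ⟨h0, fun p hp => ?_⟩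
      have := h p hp
      omega
    · rintro ⟨-, h⟩ p hp
      have := h p hp
      omega
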